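-- pv_equiv track=rewrite | github.com/adithyasean/pdsa-project | backend/algorithms/hungarian.py | _min_line_cover
-- ===== SOURCE A (Python) =====
-- def _max_matching(matrix: list[list[int]], n: int) -> tuple[list[int], list[int]]:
--     """
--     Find a maximum matching on zero entries using augmenting paths (iterative DFS).
--
--     Returns
--     -------
--     row_match : list[int]  — row_match[i] = j (task) matched to employee i, or -1
--     col_match : list[int]  — col_match[j] = i (employee) matched to task j, or -1
--     """
--     row_match = [-1] * n
--     col_match = [-1] * n
--
--     def try_augment(start: int) -> bool:
--         # Iterative DFS for an augmenting path from unmatched row `start`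
--         # stack holds (row, iterator_over_columns)
--         parent_col = {}          # col -> row that reached it
--         stack = [start]
--         visited_cols: set[int] = set()
--
--         while stack:
--             i = stack[-1]
--             found = False
--             for j in range(n):
--                 if matrix[i][j] == 0 and j not in visited_cols:
--                     visited_cols.add(j)
--                     parent_col[j] = i
--                     if col_match[j] == -1:
--                         # Augmenting path found — trace back and flip
--                         while j != -1:
--                             pi = parent_col[j]
--                             prev_j = row_match[pi]
--                             row_match[pi] = j
--                             col_match[j] = pi
--                             j = prev_j
--                         return True
--                     else:
--                         stack.append(col_match[j])
--                         found = True
--                         break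
--             if not found:
--                 stack.pop()
--
--         return False
--
--     for i in range(n):
--         if row_match[i] == -1:
--             try_augment(i)
--
--     return row_match, col_match
--
-- def _min_line_cover(
--     matrix: list[list[int]], n: int
-- ) -> tuple[set[int], set[int]]:
--     """
--     Find minimum line cover (rows + columns that cover all zeros) via König's theorem.
--
--     Algorithm:
--       1. Find a maximum matching on zeros.
--       2. Mark all unmatched rows.
--       3. Propagate via alternating paths:
--            marked row  → mark every column that has a zero in that row
--            marked col  → mark the row matched to that column (if any)
--       4. Line cover = {unmarked rows} ∪ {marked columns}
--     """
--     row_match, col_match = _max_matching(matrix, n)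
--
--     # Start with unmatched rows
--     marked_rows: set[int] = {i for i in range(n) if row_match[i] == -1}
--     marked_cols: set[int] = set()
--
--     queue = list(marked_rows)
--     while queue:
--         i = queue.pop()
--         for j in range(n):
--             if matrix[i][j] == 0 and j not in marked_cols:
--                 marked_cols.add(j)
--                 r = col_match[j]
--                 if r != -1 and r not in marked_rows:
--                     marked_rows.add(r)
--                     queue.append(r)
--
--     row_cover = {i for i in range(n) if i not in marked_rows}
--     col_cover = marked_cols
--     return row_cover, col_cover
-- ===== SOURCE B (Python) =====
-- def _max_matching(matrix: list[list[int]], n: int) -> tuple[list[int], list[int]]: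
--     """Maximum matching on zero entries via classic recursive Kuhn's algorithm."""
--     row_match = [-1] * n
--     col_match = [-1] * n
--
--     def try_kuhn(i: int, visited: set[int]) -> bool:
--         for j in range(n):
--             if matrix[i][j] == 0 and j not in visited:
--                 visited.add(j)
--                 if col_match[j] == -1 or try_kuhn(col_match[j], visited):
--                     row_match[i] = j
--                     col_match[j] = i
--                     return True
--         return False
--
--     for i in range(n):
--         if row_match[i] == -1:
--             try_kuhn(i, set())
--
--     return row_match, col_match
--
--
-- def _min_line_cover(
--     matrix: list[list[int]], n: int
-- ) -> tuple[set[int], set[int]]: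
--     """Minimum line cover of zeros (König): unmarked rows + marked columns."""
--     row_match, col_match = _max_matching(matrix, n)
--
--     marked_rows: set[int] = {i for i in range(n) if row_match[i] == -1}
--     marked_cols: set[int] = set()
--
--     queue = list(marked_rows)
--     while queue:
--         i = queue.pop()
--         for j in range(n):
--             if matrix[i][j] == 0 and j not in marked_cols:
--                 marked_cols.add(j)
--                 r = col_match[j]
--                 if r != -1 and r not in marked_rows:
--                     marked_rows.add(r)
--                     queue.append(r)
--
--     row_cover = {i for i in range(n) if i not in marked_rows}
--     return row_cover, marked_cols
-- ===== Notes on version B (the rewrite author's own statement) =====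
-- stated objective: simpler
-- what changed: The maximum matching is computed by the classic recursive Kuhn augmenting-path algorithm (a short try_kuhn(i) with a per-start visited set) instead of A's iterative stack-based DFS with an explicit parent_col map and a trace-back flip loop; it produces the identical matching and hence the identical cover.
-- outside the precondition, e.g. on _min_line_cover([[1, 1], [0]], 2): A returns ({1}, set()), B returns ({1}, set())
import Mathlib
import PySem

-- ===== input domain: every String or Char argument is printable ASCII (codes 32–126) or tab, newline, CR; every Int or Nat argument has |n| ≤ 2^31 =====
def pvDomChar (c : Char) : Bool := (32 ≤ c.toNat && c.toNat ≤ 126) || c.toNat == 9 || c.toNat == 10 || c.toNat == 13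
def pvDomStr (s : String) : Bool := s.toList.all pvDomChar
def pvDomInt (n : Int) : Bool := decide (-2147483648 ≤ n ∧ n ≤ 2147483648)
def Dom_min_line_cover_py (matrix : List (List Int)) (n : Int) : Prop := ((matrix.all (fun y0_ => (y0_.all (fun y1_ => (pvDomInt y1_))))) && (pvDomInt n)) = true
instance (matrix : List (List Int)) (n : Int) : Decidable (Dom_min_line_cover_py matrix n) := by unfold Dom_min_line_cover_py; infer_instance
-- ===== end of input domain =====

-- A computes the minimum line cover of zeros via König's theorem, finding a maximum
-- matching with an ITERATIVE stack-based DFS (rescanning columns from 0 at each step);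
-- B replaces that with the classic RECURSIVE Kuhn augmenting-path algorithm (simpler:
-- shorter and plainer).  The final row/column cover sets (and the matching) coincide.
-- Both Pythons mutate only local state; the equivalence is about the return value.

-- matrix[i][j] for Nat indices (nonnegative, in range under Pre_; default never reached there)
def pvCell (matrix : List (List Int)) (i j : Nat) : Int :=
  ((matrix.getD i []).getD j 1)

-- ===== PORT A =====
-- first j in [j0, nn) with matrix[i][j] == 0 and j not in visited (the only iterations of
-- A's inner `for j in range(n)` that have any effect)
def pvScanA (matrix : List (List Int)) (nn i : Nat) (v : PySem.Set Nat) (j0 : Nat) : Option Nat :=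
  if _h : j0 < nn then
    (if pvCell matrix i j0 = 0 ∧ v.contains j0 = false then some j0
     else pvScanA matrix nn i v (j0 + 1))
  else none
termination_by nn - j0

-- the augmenting-path flip: `while j != -1: pi = parent_col[j]; prev = row_match[pi]; …`
-- (fuel bounds the chain length; under the loop invariant it is never exhausted)
def pvFlipA (p : PySem.Dict Nat Nat) : Nat → Int → List Int → List Int → List Int × List Int
  | 0, _, rm, cm => (rm, cm)
  | f + 1, j, rm, cm =>
    if j = -1 then (rm, cm)
    else
      let pi := (p.get? j.toNat).getD 0     -- KeyError impossible: parent_col is set before lookup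
      let prev := rm.getD pi (-1)
      pvFlipA p f prev (rm.set pi j) (cm.set j.toNat (Int.ofNat pi))

-- the `while stack:` loop of try_augment (head of the list = top of the stack;
-- fuel 2*nn+2 bounds the number of iterations: ≤ nn pushes, ≤ nn+1 pops, one return)
def pvLoopA (matrix : List (List Int)) (nn : Nat) :
    Nat → List Nat → PySem.Set Nat → PySem.Dict Nat Nat → List Int → List Int →
    Bool × List Int × List Int
  | 0, _, _, _, rm, cm => (false, rm, cm)
  | _ + 1, [], _, _, rm, cm => (false, rm, cm)
  | f + 1, i :: rest, v, p, rm, cm =>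
    match pvScanA matrix nn i v 0 with
    | none => pvLoopA matrix nn f rest v p rm cm                     -- stack.pop()
    | some j =>
      let v' := PySem.Set.add v j                                    -- visited_cols.add(j)
      let p' := p.insert j i                                         -- parent_col[j] = i
      if cm.getD j (-1) = -1 then
        let fc := pvFlipA p' (nn + 1) (Int.ofNat j) rm cm            -- trace back and flip
        (true, fc.1, fc.2)
      else
        pvLoopA matrix nn f ((cm.getD j (-1)).toNat :: i :: rest) v' p' rm cm   -- push

def pvAugA (matrix : List (List Int)) (nn start : Nat) (rm cm : List Int) :
    Bool × List Int × List Int :=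
  pvLoopA matrix nn (2 * nn + 2) [start] PySem.Set.empty PySem.Dict.empty rm cm

-- `for i in range(n): if row_match[i] == -1: try_augment(i)`
def pvMatchA (matrix : List (List Int)) (nn : Nat) : List Int × List Int :=
  (List.range nn).foldl
    (fun s i =>
      if s.1.getD i (-1) = -1 then
        let r := pvAugA matrix nn i s.1 s.2
        (r.2.1, r.2.2)
      else s)
    (List.replicate nn (-1), List.replicate nn (-1))

-- the marking worklist of _min_line_cover (shared verbatim by both B and A's Python).
-- `queue.pop()` pops from the END; the initial queue is `list(marked_rows)` — Python's
-- set iteration order is not modelled, but the final marked SETS are a worklist closure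
-- and independent of processing order, so the returned sets are exact.
def pvCoverStep (matrix : List (List Int)) (nn : Nat) (cm : List Int) (i : Nat)
    (st : List Nat × PySem.Set Nat × PySem.Set Nat) :
    List Nat × PySem.Set Nat × PySem.Set Nat :=
  (List.range nn).foldl
    (fun st j =>
      if pvCell matrix i j = 0 ∧ st.2.2.contains j = false then
        let mc' := PySem.Set.add st.2.2 j
        let r := cm.getD j (-1)
        if r ≠ -1 ∧ st.2.1.contains r.toNat = false then
          (st.1 ++ [r.toNat], PySem.Set.add st.2.1 r.toNat, mc')
        else (st.1, st.2.1, mc')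
      else st)
    st

def pvCoverLoop (matrix : List (List Int)) (nn : Nat) (cm : List Int) :
    Nat → List Nat → PySem.Set Nat → PySem.Set Nat → PySem.Set Nat × PySem.Set Nat
  | 0, _, mr, mc => (mr, mc)
  | f + 1, q, mr, mc =>
    match q.getLast? with
    | none => (mr, mc)
    | some i =>
      let st := pvCoverStep matrix nn cm i (q.dropLast, mr, mc)
      pvCoverLoop matrix nn cm f st.1 st.2.1 st.2.2

def pvCover (matrix : List (List Int)) (nn : Nat) (rm cm : List Int) : List Int × List Int :=
  let mr0 : PySem.Set Nat :=
    PySem.Set.ofList ((List.range nn).filter (fun i => rm.getD i (-1) = -1))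
  let r := pvCoverLoop matrix nn cm (2 * nn + 2) mr0 mr0 PySem.Set.empty
  (((List.range nn).filter (fun i => (r.1.contains i) = false)).map Int.ofNat,
   r.2.map Int.ofNat)

def min_line_cover_py (matrix : List (List Int)) (n : Int) : List Int × List Int :=
  let nn := n.toNat
  let mm := pvMatchA matrix nn
  pvCover matrix nn mm.1 mm.2

-- ===== PORT B =====
-- classic recursive Kuhn: `def try_kuhn(i, visited): for j in range(n): …`
-- (fuel bounds the recursion DEPTH; each recursive call first marks a fresh column
-- visited, so depth ≤ nn and fuel nn+1 is never exhausted)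
def pvKuhn (matrix : List (List Int)) (nn : Nat) :
    (f i j : Nat) → PySem.Set Nat → List Int → List Int →
    Bool × PySem.Set Nat × List Int × List Int
  | f, i, j, v, rm, cm =>
    if _h : j < nn then
      if pvCell matrix i j = 0 ∧ v.contains j = false then
        let v' := PySem.Set.add v j
        let c := cm.getD j (-1)
        if c = -1 then
          (true, v', rm.set i (Int.ofNat j), cm.set j (Int.ofNat i))
        else
          match f with
          | 0 => (false, v', rm, cm)     -- fuel guard, unreachable (depth ≤ nn)
          | f' + 1 =>
            let r := pvKuhn matrix nn f' c.toNat 0 v' rm cm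
            if r.1 then
              (true, r.2.1, r.2.2.1.set i (Int.ofNat j), r.2.2.2.set j (Int.ofNat i))
            else
              pvKuhn matrix nn (f' + 1) i (j + 1) r.2.1 r.2.2.1 r.2.2.2
      else pvKuhn matrix nn f i (j + 1) v rm cm
    else (false, v, rm, cm)
termination_by f _ j => (f, nn - j)

def pvMatchB (matrix : List (List Int)) (nn : Nat) : List Int × List Int :=
  (List.range nn).foldl
    (fun s i =>
      if s.1.getD i (-1) = -1 then
        let r := pvKuhn matrix nn (nn + 1) i 0 PySem.Set.empty s.1 s.2
        (r.2.2.1, r.2.2.2)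
      else s)
    (List.replicate nn (-1), List.replicate nn (-1))

def min_line_cover_py_alt (matrix : List (List Int)) (n : Int) : List Int × List Int :=
  let nn := n.toNat
  let mm := pvMatchB matrix nn
  pvCover matrix nn mm.1 mm.2

-- ===== PRECONDITION & SPEC =====
-- Pre_ excludes matrices with fewer than n rows, or whose first n rows are shorter
-- than n: there `matrix[i][j]` generally raises IndexError in A (for a ragged matrix
-- whether a short row is ever indexed out of range depends on which cells the search
-- reaches, so Pre_ conservatively requires the first n rows to have length ≥ n).
def Pre_min_line_cover_py (matrix : List (List Int)) (n : Int) : Prop :=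
  0 < n → ((n ≤ (matrix.length : Int)) ∧ ∀ r ∈ matrix.take n.toNat, n ≤ (r.length : Int))
instance (matrix : List (List Int)) (n : Int) : Decidable (Pre_min_line_cover_py matrix n) := by
  unfold Pre_min_line_cover_py; infer_instance

def pvWitness_min_line_cover_py : List (List Int) × Int := ([[0, 1], [1, 0]], 2)

def Spec_min_line_cover_py (matrix : List (List Int)) (n : Int) (out : List Int × List Int) : Prop := out = min_line_cover_py_alt matrix n
instance (matrix : List (List Int)) (n : Int) (out : List Int × List Int) : Decidable (Spec_min_line_cover_py matrix n out) := by unfold Spec_min_line_cover_py; infer_instance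

-- ===== CLAIM (what is proved, stated in full; the proofs are below) =====
def Claim_equal_min_line_cover_py : Prop := ∀ (matrix : List (List Int)) (n : Int), Dom_min_line_cover_py matrix n → Pre_min_line_cover_py matrix n → Spec_min_line_cover_py matrix n (min_line_cover_py matrix n)

-- ===== LEMMAS AND PROOFS =====

-- ---- small helpers on PySem.Set Nat ----

theorem pv_contains_false (v : PySem.Set Nat) (j : Nat) :
    PySem.Set.contains v j = false ↔ j ∉ v := by
  simp [PySem.Set.contains]

-- number of unvisited columns below nn
def pvUnvis (nn : Nat) (v : PySem.Set Nat) : Nat :=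
  ((List.range nn).filter (fun j => decide (j ∉ v))).length

theorem pvUnvis_le (nn : Nat) (v : PySem.Set Nat) : pvUnvis nn v ≤ nn := by
  simpa [pvUnvis] using List.length_filter_le _ (List.range nn)

theorem pvUnvis_mono (nn : Nat) (v v' : PySem.Set Nat) (h : ∀ x, x ∈ v → x ∈ v') :
    pvUnvis nn v' ≤ pvUnvis nn v := by
  unfold pvUnvis
  apply List.Sublist.length_le
  apply List.monotone_filter_right
  intro x hx
  simp only [decide_eq_true_eq] at hx ⊢
  exact fun hv => hx (h x hv)

theorem pvUnvis_add (nn : Nat) (v : PySem.Set Nat) (j : Nat) (hj : j < nn) (hv : j ∉ v) :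
    pvUnvis nn (PySem.Set.add v j) + 1 = pvUnvis nn v := by
  unfold pvUnvis
  have hf : (List.range nn).filter (fun x => decide (x ∉ PySem.Set.add v j))
      = ((List.range nn).filter (fun x => decide (x ∉ v))).filter (fun x => !(x == j)) := by
    rw [List.filter_filter]
    apply List.filter_congr
    intro x hx
    have := PySem.Set.mem_add v j x
    by_cases h1 : x ∈ v <;> by_cases h2 : x = j <;> simp_all
  rw [hf]
  set l := (List.range nn).filter (fun x => decide (x ∉ v)) with hl
  have hmem : j ∈ l := by simp [hl, List.mem_filter, hj, hv]
  have hnd : l.Nodup := (List.nodup_range).filter _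
  have hcount : l.count j = 1 := List.count_eq_one_of_mem hnd hmem
  have hsplit := List.length_eq_countP_add_countP (p := fun x => x == j) (l := l)
  have h1 : l.countP (fun x => x == j) = 1 := by
    simpa [List.count] using hcount
  have h2 : (l.filter (fun x => !(x == j))).length = l.countP (fun x => !(x == j)) :=
    List.countP_eq_length_filter.symm
  have h3 : l.countP (fun a => decide ¬(a == j) = true) = l.countP (fun x => !(x == j)) := by
    apply List.countP_congr; intro x _; simp
  omega

theorem pv_toNat_ofNat (n : Nat) : (Int.ofNat n).toNat = n := rfl

-- getD/set arithmetic used throughout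
theorem pv_getD_set_self (l : List Int) (i : Nat) (a d : Int) (h : i < l.length) :
    (l.set i a).getD i d = a := by simp [List.getD, h]

theorem pv_getD_set_ne (l : List Int) (i k : Nat) (a d : Int) (h : i ≠ k) :
    (l.set i a).getD k d = l.getD k d := by simp [List.getD, h]

-- ---- pvScanA characterisation ----

theorem pvScanA_none (matrix : List (List Int)) (nn i : Nat) (v : PySem.Set Nat) :
    ∀ j0, pvScanA matrix nn i v j0 = none →
      ∀ j, j0 ≤ j → j < nn → ¬(pvCell matrix i j = 0 ∧ PySem.Set.contains v j = false) := by
  intro j0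
  fun_induction pvScanA matrix nn i v j0 with
  | case1 j0 h hq => simp
  | case2 j0 h hq ih =>
    intro hnone j hj1 hj2 hq2
    rcases Nat.eq_or_lt_of_le hj1 with rfl | hlt
    · exact hq hq2
    · exact ih hnone j hlt hj2 hq2
  | case3 j0 h =>
    intro _ j hj1 hj2
    omega

theorem pvScanA_some (matrix : List (List Int)) (nn i : Nat) (v : PySem.Set Nat) :
    ∀ j0 j, pvScanA matrix nn i v j0 = some j →
      j0 ≤ j ∧ j < nn ∧ pvCell matrix i j = 0 ∧ PySem.Set.contains v j = false ∧
      ∀ jj, j0 ≤ jj → jj < j → ¬(pvCell matrix i jj = 0 ∧ PySem.Set.contains v jj = false) := by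
  intro j0
  fun_induction pvScanA matrix nn i v j0 with
  | case1 j0 h hq =>
    intro j hsome
    obtain rfl : j0 = j := by simpa using hsome
    exact ⟨le_refl _, h, hq.1, hq.2, by omega⟩
  | case2 j0 h hq ih =>
    intro j hsome
    obtain ⟨h1, h2, h3, h4, h5⟩ := ih j hsome
    refine ⟨by omega, h2, h3, h4, ?_⟩
    intro jj hj1 hj2 hq2
    rcases Nat.eq_or_lt_of_le hj1 with rfl | hlt
    · exact hq hq2
    · exact h5 jj hlt hj2 hq2
  | case3 j0 h => intro j hsome; simp at hsome

-- ---- basic pvKuhn facts: visited only grows; failure leaves the matching unchanged ----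

theorem pvKuhn_vmono (matrix : List (List Int)) (nn : Nat) :
    ∀ (f i j : Nat) (v : PySem.Set Nat) (rm cm : List Int),
    ∀ x ∈ v, x ∈ (pvKuhn matrix nn f i j v rm cm).2.1 := by
  intro f i j v rm cm
  fun_induction pvKuhn matrix nn f i j v rm cm with
  | case1 f i j v rm cm h hq c hc =>
    intro x hx; exact (PySem.Set.mem_add _ _ _).2 (Or.inl hx)
  | case2 i j v rm cm h hq c hc =>
    intro x hx; exact (PySem.Set.mem_add _ _ _).2 (Or.inl hx)
  | case3 i j v rm cm h hq v' c hc f' r hr ih =>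
    intro x hx
    exact ih x ((PySem.Set.mem_add _ _ _).2 (Or.inl hx))
  | case4 i j v rm cm h hq v' c hc f' r hr ih1 ih2 ih3 =>
    intro x hx
    exact ih3 x (ih1 x ((PySem.Set.mem_add _ _ _).2 (Or.inl hx)))
  | case5 f i j v rm cm h hq ih => intro x hx; exact ih x hx
  | case6 f i j v rm cm h => intro x hx; exact hx

theorem pvKuhn_fail (matrix : List (List Int)) (nn : Nat) :
    ∀ (f i j : Nat) (v : PySem.Set Nat) (rm cm : List Int),
    (pvKuhn matrix nn f i j v rm cm).1 = false →
    (pvKuhn matrix nn f i j v rm cm).2.2.1 = rm ∧ (pvKuhn matrix nn f i j v rm cm).2.2.2 = cm := by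
  intro f i j v rm cm
  fun_induction pvKuhn matrix nn f i j v rm cm with
  | case1 f i j v rm cm h hq c hc => intro hfalse; simp at hfalse
  | case2 i j v rm cm h hq c hc => intro _; exact ⟨rfl, rfl⟩
  | case3 i j v rm cm h hq v' c hc f' r hr ih => intro hfalse; simp at hfalse
  | case4 i j v rm cm h hq v' c hc f' r hr ih1 ih2 ih3 =>
    intro hfalse
    have h1 := ih1 (by simpa using hr)
    have e1 : r.2.2.1 = rm := h1.1
    have e2 : r.2.2.2 = cm := h1.2
    rw [e1, e2] at ih3 hfalse ⊢
    exact ih3 hfalse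
  | case5 f i j v rm cm h hq ih => exact ih
  | case6 f i j v rm cm h => intro _; exact ⟨rfl, rfl⟩

-- ---- one-step unfolding equations for pvKuhn ----

theorem pvKuhn_at_stop (matrix : List (List Int)) (nn : Nat) (f i j : Nat)
    (v : PySem.Set Nat) (rm cm : List Int) (h : ¬ j < nn) :
    pvKuhn matrix nn f i j v rm cm = (false, v, rm, cm) := by
  rw [pvKuhn.eq_def]; simp [h]

theorem pvKuhn_at_skip (matrix : List (List Int)) (nn : Nat) (f i j : Nat)
    (v : PySem.Set Nat) (rm cm : List Int) (h : j < nn)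
    (hq : ¬ (pvCell matrix i j = 0 ∧ v.contains j = false)) :
    pvKuhn matrix nn f i j v rm cm = pvKuhn matrix nn f i (j + 1) v rm cm := by
  rw [pvKuhn.eq_def]; simp only [dif_pos h, if_neg hq]

theorem pvKuhn_at_free (matrix : List (List Int)) (nn : Nat) (f i j : Nat)
    (v : PySem.Set Nat) (rm cm : List Int) (h : j < nn)
    (hq : pvCell matrix i j = 0 ∧ v.contains j = false) (hcm : cm.getD j (-1) = -1) :
    pvKuhn matrix nn f i j v rm cm =
      (true, v.add j, rm.set i (Int.ofNat j), cm.set j (Int.ofNat i)) := by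
  rw [pvKuhn.eq_def]; simp [h, hq]
  rw [if_neg ((pv_contains_false v j).1 hq.2), if_pos (by simpa using hcm)]

theorem pvKuhn_at_matched (matrix : List (List Int)) (nn : Nat) (f' i j : Nat)
    (v : PySem.Set Nat) (rm cm : List Int) (h : j < nn)
    (hq : pvCell matrix i j = 0 ∧ v.contains j = false) (hcm : cm.getD j (-1) ≠ -1) :
    pvKuhn matrix nn (f' + 1) i j v rm cm =
      (let r := pvKuhn matrix nn f' (cm.getD j (-1)).toNat 0 (v.add j) rm cm;
       if r.1 then
         (true, r.2.1, r.2.2.1.set i (Int.ofNat j), r.2.2.2.set j (Int.ofNat i))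
       else pvKuhn matrix nn (f' + 1) i (j + 1) r.2.1 r.2.2.1 r.2.2.2) := by
  rw [pvKuhn.eq_def]; simp only [dif_pos h, if_pos hq, if_neg hcm]

theorem pvKuhn_allfail (matrix : List (List Int)) (nn : Nat) (f i : Nat)
    (v : PySem.Set Nat) (rm cm : List Int)
    (h : ∀ jj, jj < nn → ¬ (pvCell matrix i jj = 0 ∧ v.contains jj = false)) :
    ∀ (d j : Nat), nn - j ≤ d → pvKuhn matrix nn f i j v rm cm = (false, v, rm, cm) := by
  intro d
  induction d with
  | zero =>
    intro j hd
    exact pvKuhn_at_stop matrix nn f i j v rm cm (by omega)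
  | succ d ih =>
    intro j hd
    by_cases hj : j < nn
    · rw [pvKuhn_at_skip matrix nn f i j v rm cm hj (h j hj)]
      exact ih (j + 1) (by omega)
    · exact pvKuhn_at_stop matrix nn f i j v rm cm hj

-- ---- with enough fuel, the fuel does not matter ----
theorem pvKuhn_fuel (matrix : List (List Int)) (nn : Nat) :
    ∀ (μ f g i j : Nat) (v : PySem.Set Nat) (rm cm : List Int),
    f * (nn + 1) + (nn - j) ≤ μ → pvUnvis nn v + 1 ≤ f → pvUnvis nn v + 1 ≤ g →
    pvKuhn matrix nn f i j v rm cm = pvKuhn matrix nn g i j v rm cm := by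
  intro μ
  induction μ with
  | zero =>
    intro f g i j v rm cm hμ hf hg
    exfalso
    have h0 : f * (nn + 1) = 0 := by omega
    rcases Nat.mul_eq_zero.1 h0 with h | h <;> omega
  | succ μ ih =>
    intro f g i j v rm cm hμ hf hg
    obtain ⟨f0, rfl⟩ : ∃ f0, f = f0 + 1 := ⟨f - 1, by omega⟩
    obtain ⟨g0, rfl⟩ : ∃ g0, g = g0 + 1 := ⟨g - 1, by omega⟩
    have hP : (f0 + 1) * (nn + 1) = f0 * (nn + 1) + (nn + 1) := by ring
    by_cases hj : j < nn
    · by_cases hq : pvCell matrix i j = 0 ∧ v.contains j = false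
      · by_cases hcm : cm.getD j (-1) = -1
        · rw [pvKuhn_at_free matrix nn _ i j v rm cm hj hq hcm,
              pvKuhn_at_free matrix nn _ i j v rm cm hj hq hcm]
        · have hjv : j ∉ v := (pv_contains_false v j).1 hq.2
          have hu : pvUnvis nn (v.add j) + 1 = pvUnvis nn v := pvUnvis_add nn v j hj hjv
          rw [pvKuhn_at_matched matrix nn f0 i j v rm cm hj hq hcm,
              pvKuhn_at_matched matrix nn g0 i j v rm cm hj hq hcm]
          have hchild : pvKuhn matrix nn f0 (cm.getD j (-1)).toNat 0 (v.add j) rm cm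
              = pvKuhn matrix nn g0 (cm.getD j (-1)).toNat 0 (v.add j) rm cm := by
            apply ih
            · set P := f0 * (nn + 1) with hPdef
              rw [hP] at hμ; omega
            · omega
            · omega
          rw [hchild]
          by_cases hb : (pvKuhn matrix nn g0 (cm.getD j (-1)).toNat 0 (v.add j) rm cm).1 = true
          · simp only [hb, if_true]
          · simp only [Bool.not_eq_true] at hb
            simp only [hb, Bool.false_eq_true, if_false]
            apply ih
            · set P := f0 * (nn + 1) with hPdef
              rw [hP] at hμ; omega
            · have hmono := pvUnvis_mono nn (v.add j)
                (pvKuhn matrix nn g0 (cm.getD j (-1)).toNat 0 (v.add j) rm cm).2.1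
                (pvKuhn_vmono matrix nn g0 _ 0 (v.add j) rm cm)
              omega
            · have hmono := pvUnvis_mono nn (v.add j)
                (pvKuhn matrix nn g0 (cm.getD j (-1)).toNat 0 (v.add j) rm cm).2.1
                (pvKuhn_vmono matrix nn g0 _ 0 (v.add j) rm cm)
              omega
      · rw [pvKuhn_at_skip matrix nn _ i j v rm cm hj hq,
            pvKuhn_at_skip matrix nn _ i j v rm cm hj hq]
        apply ih
        · set P := f0 * (nn + 1) with hPdef
          rw [hP] at hμ
          have : (f0 + 1) * (nn + 1) = P + (nn + 1) := by rw [hPdef]; ring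
          rw [this]; omega
        · omega
        · omega
    · rw [pvKuhn_at_stop matrix nn _ i j v rm cm hj, pvKuhn_at_stop matrix nn _ i j v rm cm hj]

-- ---- the matching invariant and its preservation by a successful Kuhn call ----

-- rm/cm form a partial matching: mutually inverse, entries in range
def pvM (nn : Nat) (rm cm : List Int) : Prop :=
  rm.length = nn ∧ cm.length = nn ∧
  (∀ a, a < nn → rm.getD a (-1) = -1 ∨
    ∃ jj, jj < nn ∧ rm.getD a (-1) = Int.ofNat jj ∧ cm.getD jj (-1) = Int.ofNat a) ∧
  (∀ jj, jj < nn → cm.getD jj (-1) = -1 ∨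
    ∃ a, a < nn ∧ cm.getD jj (-1) = Int.ofNat a ∧ rm.getD a (-1) = Int.ofNat jj)

-- what a successful call guarantees (everything the caller and the outer loop need)
def pvKS (nn : Nat) (i : Nat) (v : PySem.Set Nat) (rm cm rm' cm' : List Int) : Prop :=
  rm'.length = nn ∧ cm'.length = nn ∧
  (∀ jj, jj < nn → cm'.getD jj (-1) ≠ cm.getD jj (-1) → jj ∉ v) ∧
  (∀ a, a < nn → rm'.getD a (-1) ≠ rm.getD a (-1) →
    (a = i ∨ ∃ jj, jj < nn ∧ jj ∉ v ∧ cm.getD jj (-1) = Int.ofNat a)) ∧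
  (∃ jn, jn < nn ∧ jn ∉ v ∧ rm'.getD i (-1) = Int.ofNat jn ∧ cm'.getD jn (-1) = Int.ofNat i) ∧
  (∀ a, a < nn → rm'.getD a (-1) = -1 ∨
    ∃ jj, jj < nn ∧ rm'.getD a (-1) = Int.ofNat jj ∧ cm'.getD jj (-1) = Int.ofNat a) ∧
  (∀ jj, jj < nn → cm'.getD jj (-1) = -1 ∨ Int.ofNat jj = rm.getD i (-1) ∨
    ∃ a, a < nn ∧ cm'.getD jj (-1) = Int.ofNat a ∧ rm'.getD a (-1) = Int.ofNat jj)

theorem pvKuhn_succ (matrix : List (List Int)) (nn : Nat) :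
    ∀ (f i j : Nat) (v : PySem.Set Nat) (rm cm : List Int),
    pvM nn rm cm → i < nn →
    (rm.getD i (-1) = -1 ∨ ∃ c0, c0 ∈ v ∧ rm.getD i (-1) = Int.ofNat c0) →
    (pvKuhn matrix nn f i j v rm cm).1 = true →
    pvKS nn i v rm cm (pvKuhn matrix nn f i j v rm cm).2.2.1
      (pvKuhn matrix nn f i j v rm cm).2.2.2 := by
  intro f i j v rm cm
  fun_induction pvKuhn matrix nn f i j v rm cm with
  | case1 f i j v rm cm h hq v' c hc =>
    intro hM hi hyp3 _
    obtain ⟨hlr, hlc, hR, hC⟩ := hM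
    have hjv : j ∉ v := (pv_contains_false v j).1 hq.2
    have hc' : cm.getD j (-1) = -1 := hc
    refine ⟨by simp [hlr], by simp [hlc], ?_, ?_, ?_, ?_, ?_⟩
    · intro jj hjj hne
      by_cases hj' : jj = j
      · subst hj'; exact hjv
      · exact absurd (pv_getD_set_ne cm j jj (Int.ofNat i) (-1) (fun hh => hj' hh.symm)) hne
    · intro a ha hne
      by_cases ha' : a = i
      · exact Or.inl ha'
      · exact absurd (pv_getD_set_ne rm i a (Int.ofNat j) (-1) (fun hh => ha' hh.symm)) hne
    · exact ⟨j, h, hjv, pv_getD_set_self rm i (Int.ofNat j) (-1) (by omega),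
        pv_getD_set_self cm j (Int.ofNat i) (-1) (by omega)⟩
    · intro a ha
      by_cases ha' : a = i
      · subst ha'
        refine Or.inr ⟨j, h, pv_getD_set_self rm a (Int.ofNat j) (-1) (by omega),
          pv_getD_set_self cm j (Int.ofNat a) (-1) (by omega)⟩
      · rw [pv_getD_set_ne rm i a (Int.ofNat j) (-1) (fun hh => ha' hh.symm)]
        rcases hR a ha with h1 | ⟨jj, hjj, h1, h2⟩
        · exact Or.inl h1
        · have hjjne : jj ≠ j := by
            intro hh; subst hh; rw [hc'] at h2; simp at h2
          exact Or.inr ⟨jj, hjj, h1,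
            by rw [pv_getD_set_ne cm j jj (Int.ofNat i) (-1) (fun hh => hjjne hh.symm)]; exact h2⟩
    · intro jj hjj
      by_cases hj' : jj = j
      · subst hj'
        refine Or.inr (Or.inr ⟨i, hi, pv_getD_set_self cm jj (Int.ofNat i) (-1) (by omega),
          pv_getD_set_self rm i (Int.ofNat jj) (-1) (by omega)⟩)
      · rw [pv_getD_set_ne cm j jj (Int.ofNat i) (-1) (fun hh => hj' hh.symm)]
        rcases hC jj hjj with h1 | ⟨a, ha, h1, h2⟩
        · exact Or.inl h1
        · by_cases ha' : a = i
          · subst ha'; exact Or.inr (Or.inl h2.symm)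
          · exact Or.inr (Or.inr ⟨a, ha, h1,
              by rw [pv_getD_set_ne rm i a (Int.ofNat j) (-1) (fun hh => ha' hh.symm)]; exact h2⟩)
  | case2 i j v rm cm h hq v' c hc => intro _ _ _ htrue; simp at htrue
  | case3 i j v rm cm h hq v' c hc f' r hr ih =>
    intro hM hi hyp3 _
    obtain ⟨hlr, hlc, hR, hC⟩ := hM
    have hjv : j ∉ v := (pv_contains_false v j).1 hq.2
    have hjv' : j ∈ v' := (PySem.Set.mem_add v j j).2 (Or.inr rfl)
    have ec : c = cm.getD j (-1) := rfl
    obtain ⟨cn, hcn, hcmj, hrmcn⟩ :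
        ∃ cn, cn < nn ∧ cm.getD j (-1) = Int.ofNat cn ∧ rm.getD cn (-1) = Int.ofNat j := by
      rcases hC j h with h1 | ⟨a, ha, h1, h2⟩
      · exact absurd (ec.trans h1) hc
      · exact ⟨a, ha, h1, h2⟩
    have ecn : c.toNat = cn := by rw [ec, hcmj]; simp
    have hchild := ih ⟨hlr, hlc, hR, hC⟩ (by omega)
      (Or.inr ⟨j, hjv', by rw [ecn, hrmcn]⟩) (by simpa using hr)
    rw [ecn] at hchild
    have er : pvKuhn matrix nn f' cn 0 v' rm cm = r := by rw [← ecn]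
    rw [er] at hchild
    obtain ⟨C1, C2, C3, C4, C5, C6, C7⟩ := hchild
    obtain ⟨jn, hjn, hjnv', hjn1, hjn2⟩ := C5
    have hne_rj : r.2.2.1.getD cn (-1) ≠ Int.ofNat j := by
      rw [hjn1]; intro hh
      exact hjnv' (by rw [Int.ofNat.inj hh] at hjn ⊢; exact hjv')
    have hsub : ∀ x, x ∈ v → x ∈ v' := fun x hx => (PySem.Set.mem_add v j x).2 (Or.inl hx)
    refine ⟨by simp [C1], by simp [C2], ?_, ?_, ?_, ?_, ?_⟩
    · intro jj hjj hne
      by_cases hj' : jj = j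
      · subst hj'; exact hjv
      · rw [pv_getD_set_ne r.2.2.2 j jj (Int.ofNat i) (-1) (fun hh => hj' hh.symm)] at hne
        exact fun hx => C3 jj hjj hne (hsub jj hx)
    · intro a ha hne
      by_cases ha' : a = i
      · exact Or.inl ha'
      · rw [pv_getD_set_ne r.2.2.1 i a (Int.ofNat j) (-1) (fun hh => ha' hh.symm)] at hne
        rcases C4 a ha hne with h1 | ⟨jj, hjj, hjjv, hcmjj⟩
        · subst h1; exact Or.inr ⟨j, h, hjv, hcmj⟩
        · exact Or.inr ⟨jj, hjj, fun hx => hjjv (hsub jj hx), hcmjj⟩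
    · exact ⟨j, h, hjv, pv_getD_set_self r.2.2.1 i (Int.ofNat j) (-1) (by omega),
        pv_getD_set_self r.2.2.2 j (Int.ofNat i) (-1) (by omega)⟩
    · intro a ha
      by_cases ha' : a = i
      · subst ha'
        exact Or.inr ⟨j, h, pv_getD_set_self r.2.2.1 a (Int.ofNat j) (-1) (by omega),
          pv_getD_set_self r.2.2.2 j (Int.ofNat a) (-1) (by omega)⟩
      · rw [pv_getD_set_ne r.2.2.1 i a (Int.ofNat j) (-1) (fun hh => ha' hh.symm)]
        rcases C6 a ha with h1 | ⟨jj, hjj, h1, h2⟩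
        · exact Or.inl h1
        · have hjjne : jj ≠ j := by
            intro hh; subst hh
            have hcm_unch : r.2.2.2.getD jj (-1) = cm.getD jj (-1) := by
              by_contra hcc
              exact C3 jj hjj hcc hjv'
            rw [hcm_unch, hcmj] at h2
            have haa : a = cn := (Int.ofNat.inj h2).symm
            rw [haa] at h1
            exact hne_rj h1
          exact Or.inr ⟨jj, hjj, h1,
            by rw [pv_getD_set_ne r.2.2.2 j jj (Int.ofNat i) (-1) (fun hh => hjjne hh.symm)]; exact h2⟩
    · intro jj hjj
      by_cases hj' : jj = j
      · subst hj'
        exact Or.inr (Or.inr ⟨i, hi, pv_getD_set_self r.2.2.2 jj (Int.ofNat i) (-1) (by omega),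
          pv_getD_set_self r.2.2.1 i (Int.ofNat jj) (-1) (by omega)⟩)
      · rw [pv_getD_set_ne r.2.2.2 j jj (Int.ofNat i) (-1) (fun hh => hj' hh.symm)]
        rcases C7 jj hjj with h1 | h1 | ⟨a, ha, h1, h2⟩
        · exact Or.inl h1
        · exfalso
          rw [hrmcn] at h1
          exact hj' (Int.ofNat.inj h1)
        · by_cases ha' : a = i
          · subst ha'
            have hrm_i_unch : r.2.2.1.getD a (-1) = rm.getD a (-1) := by
              by_contra hcc
              rcases C4 a ha hcc with h3 | ⟨jj2, hjj2, hjj2v, hcmjj2⟩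
              · subst h3
                rcases hyp3 with h4 | ⟨c0, hc0v, h4⟩
                · rw [h4] at hrmcn; simp at hrmcn
                · rw [h4] at hrmcn
                  have : c0 = j := Int.ofNat.inj hrmcn
                  exact hjv (this ▸ hc0v)
              · rcases hC jj2 hjj2 with h5 | ⟨a2, _, h5, h6⟩
                · rw [h5] at hcmjj2; simp at hcmjj2
                · rw [h5] at hcmjj2
                  have ha2 : a2 = a := Int.ofNat.inj hcmjj2
                  rw [ha2] at h6
                  rcases hyp3 with h4 | ⟨c0, hc0v, h4⟩
                  · rw [h4] at h6; simp at h6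
                  · rw [h4] at h6
                    have : c0 = jj2 := Int.ofNat.inj h6
                    exact hjj2v (hsub jj2 (this ▸ hc0v))
            rw [hrm_i_unch] at h2
            exact Or.inr (Or.inl h2.symm)
          · exact Or.inr (Or.inr ⟨a, ha, h1,
              by rw [pv_getD_set_ne r.2.2.1 i a (Int.ofNat j) (-1) (fun hh => ha' hh.symm)]; exact h2⟩)
  | case4 i j v rm cm h hq v' c hc f' r hr ih1 ih2 ih3 =>
    intro hM hi hyp3 htrue
    have hfail := pvKuhn_fail matrix nn f' c.toNat 0 v' rm cm (by simpa using hr)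
    have e1 : r.2.2.1 = rm := hfail.1
    have e2 : r.2.2.2 = cm := hfail.2
    rw [e1, e2] at ih3 htrue ⊢
    have hsub : ∀ x, x ∈ v → x ∈ r.2.1 := by
      intro x hx
      exact pvKuhn_vmono matrix nn f' c.toNat 0 v' rm cm x ((PySem.Set.mem_add v j x).2 (Or.inl hx))
    have hyp3' : rm.getD i (-1) = -1 ∨ ∃ c0, c0 ∈ r.2.1 ∧ rm.getD i (-1) = Int.ofNat c0 := by
      rcases hyp3 with h1 | ⟨c0, hc0, h1⟩
      · exact Or.inl h1
      · exact Or.inr ⟨c0, hsub c0 hc0, h1⟩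
    obtain ⟨C1, C2, C3, C4, C5, C6, C7⟩ := ih3 hM hi hyp3' htrue
    refine ⟨C1, C2, ?_, ?_, ?_, C6, C7⟩
    · intro jj hjj hne
      exact fun hx => C3 jj hjj hne (hsub jj hx)
    · intro a ha hne
      rcases C4 a ha hne with h1 | ⟨jj, hjj, hjjv, hcmjj⟩
      · exact Or.inl h1
      · exact Or.inr ⟨jj, hjj, fun hx => hjjv (hsub jj hx), hcmjj⟩
    · obtain ⟨jn, hjn, hjnv, h1, h2⟩ := C5
      exact ⟨jn, hjn, fun hx => hjnv (hsub jn hx), h1, h2⟩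
  | case5 f i j v rm cm h hq ih => exact ih
  | case6 f i j v rm cm h => intro _ _ _ htrue; simp at htrue

-- ---- B-side driver: run Kuhn from the top of a pending ancestor context ----

def pvUnwind : List (Nat × Nat) → List Int → List Int → List Int × List Int
  | [], rm, cm => (rm, cm)
  | (r, c) :: ctx, rm, cm => pvUnwind ctx (rm.set r (Int.ofNat c)) (cm.set c (Int.ofNat r))

def pvKrun (matrix : List (List Int)) (nn : Nat) :
    Nat → Nat → List (Nat × Nat) → PySem.Set Nat → List Int → List Int →
    Bool × List Int × List Int
  | 0, _, _, _, rm, cm => (false, rm, cm)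
  | g + 1, i, ctx, v, rm, cm =>
    let r := pvKuhn matrix nn (nn + 1) i 0 v rm cm
    if r.1 then
      (true, (pvUnwind ctx r.2.2.1 r.2.2.2).1, (pvUnwind ctx r.2.2.1 r.2.2.2).2)
    else
      match ctx with
      | [] => (false, r.2.2.1, r.2.2.2)
      | (r', _) :: ctx' => pvKrun matrix nn g r' ctx' r.2.1 r.2.2.1 r.2.2.2

theorem pvKuhn_skip_many (matrix : List (List Int)) (nn : Nat) (f i : Nat)
    (v : PySem.Set Nat) (rm cm : List Int) :
    ∀ (d a b : Nat), b - a ≤ d → a ≤ b →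
    (∀ jj, a ≤ jj → jj < b → ¬ (pvCell matrix i jj = 0 ∧ v.contains jj = false)) →
    pvKuhn matrix nn f i a v rm cm = pvKuhn matrix nn f i b v rm cm := by
  intro d
  induction d with
  | zero =>
    intro a b h1 h2 _
    obtain rfl : a = b := Nat.le_antisymm h2 (by omega)
    rfl
  | succ d ih =>
    intro a b h1 h2 hq
    rcases Nat.eq_or_lt_of_le h2 with rfl | hab
    · rfl
    · by_cases ha : a < nn
      · rw [pvKuhn_at_skip matrix nn f i a v rm cm ha (hq a (le_refl a) hab)]
        exact ih (a + 1) b (by omega) (by omega) (fun jj hj1 hj2 => hq jj (by omega) hj2)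
      · rw [pvKuhn_at_stop matrix nn f i a v rm cm ha,
            pvKuhn_at_stop matrix nn f i b v rm cm (by omega)]

theorem pvKrun_fuel (matrix : List (List Int)) (nn : Nat) :
    ∀ (ctx : List (Nat × Nat)) (g g' i : Nat) (v : PySem.Set Nat) (rm cm : List Int),
    pvUnvis nn v + ctx.length + 1 ≤ g → pvUnvis nn v + ctx.length + 1 ≤ g' →
    pvKrun matrix nn g i ctx v rm cm = pvKrun matrix nn g' i ctx v rm cm := by
  intro ctx
  induction ctx with
  | nil =>
    intro g g' i v rm cm hg hg'
    obtain ⟨g0, rfl⟩ : ∃ g0, g = g0 + 1 := ⟨g - 1, by omega⟩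
    obtain ⟨g0', rfl⟩ : ∃ g0', g' = g0' + 1 := ⟨g' - 1, by omega⟩
    rfl
  | cons hd tl ih =>
    intro g g' i v rm cm hg hg'
    obtain ⟨g0, rfl⟩ : ∃ g0, g = g0 + 1 := ⟨g - 1, by omega⟩
    obtain ⟨g0', rfl⟩ : ∃ g0', g' = g0' + 1 := ⟨g' - 1, by omega⟩
    show (let r := pvKuhn matrix nn (nn + 1) i 0 v rm cm;
      if r.1 then (true, (pvUnwind (hd :: tl) r.2.2.1 r.2.2.2).1, (pvUnwind (hd :: tl) r.2.2.1 r.2.2.2).2)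
      else pvKrun matrix nn g0 hd.1 tl r.2.1 r.2.2.1 r.2.2.2) =
      (let r := pvKuhn matrix nn (nn + 1) i 0 v rm cm;
      if r.1 then (true, (pvUnwind (hd :: tl) r.2.2.1 r.2.2.2).1, (pvUnwind (hd :: tl) r.2.2.1 r.2.2.2).2)
      else pvKrun matrix nn g0' hd.1 tl r.2.1 r.2.2.1 r.2.2.2)
    by_cases hb : (pvKuhn matrix nn (nn + 1) i 0 v rm cm).1 = true
    · simp only [hb, if_true]
    · simp only [Bool.not_eq_true] at hb
      simp only [hb, Bool.false_eq_true, if_false]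
      have hmono := pvUnvis_mono nn v (pvKuhn matrix nn (nn + 1) i 0 v rm cm).2.1
        (pvKuhn_vmono matrix nn (nn + 1) i 0 v rm cm)
      exact ih g0 g0' hd.1 _ _ _ (by simp at hg ⊢; omega) (by simp at hg' ⊢; omega)

-- ---- pushing onto the DFS stack corresponds to one in-line recursion of Kuhn ----

theorem pvKrun_eq (matrix : List (List Int)) (nn g i : Nat) (ctx : List (Nat × Nat))
    (v : PySem.Set Nat) (rm cm : List Int) :
    pvKrun matrix nn (g + 1) i ctx v rm cm =
      if (pvKuhn matrix nn (nn + 1) i 0 v rm cm).1 then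
        (true,
          (pvUnwind ctx (pvKuhn matrix nn (nn + 1) i 0 v rm cm).2.2.1
            (pvKuhn matrix nn (nn + 1) i 0 v rm cm).2.2.2).1,
          (pvUnwind ctx (pvKuhn matrix nn (nn + 1) i 0 v rm cm).2.2.1
            (pvKuhn matrix nn (nn + 1) i 0 v rm cm).2.2.2).2)
      else
        match ctx with
        | [] => (false, (pvKuhn matrix nn (nn + 1) i 0 v rm cm).2.2.1,
            (pvKuhn matrix nn (nn + 1) i 0 v rm cm).2.2.2)
        | (r', _) :: ctx' => pvKrun matrix nn g r' ctx'
            (pvKuhn matrix nn (nn + 1) i 0 v rm cm).2.1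
            (pvKuhn matrix nn (nn + 1) i 0 v rm cm).2.2.1
            (pvKuhn matrix nn (nn + 1) i 0 v rm cm).2.2.2 := rfl

theorem pvKrun_step (matrix : List (List Int)) (nn : Nat) (g i j : Nat)
    (ctx : List (Nat × Nat)) (v : PySem.Set Nat) (rm cm : List Int)
    (hj : j < nn) (hz : pvCell matrix i j = 0) (hjv : j ∉ v)
    (hfirst : ∀ jj, jj < j → ¬ (pvCell matrix i jj = 0 ∧ v.contains jj = false))
    (hcm : cm.getD j (-1) ≠ -1)
    (hg : pvUnvis nn v + ctx.length + 2 ≤ g) :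
    pvKrun matrix nn g (cm.getD j (-1)).toNat ((i, j) :: ctx) (v.add j) rm cm
      = pvKrun matrix nn g i ctx v rm cm := by
  obtain ⟨g0, rfl⟩ : ∃ g0, g = g0 + 1 := ⟨g - 1, by omega⟩
  have hq : pvCell matrix i j = 0 ∧ v.contains j = false :=
    ⟨hz, (pv_contains_false v j).2 hjv⟩
  have hu : pvUnvis nn (v.add j) + 1 = pvUnvis nn v := pvUnvis_add nn v j hj hjv
  have hule := pvUnvis_le nn v
  have hskip : pvKuhn matrix nn (nn + 1) i 0 v rm cm = pvKuhn matrix nn (nn + 1) i j v rm cm :=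
    pvKuhn_skip_many matrix nn (nn + 1) i v rm cm j 0 j (by omega) (by omega)
      (fun jj h1 h2 => hfirst jj h2)
  have hmatched := pvKuhn_at_matched matrix nn nn i j v rm cm hj hq hcm
  -- the child call on the left has fuel nn+1, inside the right-hand run it has fuel nn
  have hchild : pvKuhn matrix nn (nn + 1) (cm.getD j (-1)).toNat 0 (v.add j) rm cm
      = pvKuhn matrix nn nn (cm.getD j (-1)).toNat 0 (v.add j) rm cm :=
    pvKuhn_fuel matrix nn ((nn + 1) * (nn + 1) + nn) (nn + 1) nn _ 0 (v.add j) rm cm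
      (le_refl _) (by omega) (by omega)
  set r0 := pvKuhn matrix nn nn (cm.getD j (-1)).toNat 0 (v.add j) rm cm with hr0
  rw [pvKrun_eq matrix nn g0 ((cm.getD j (-1)).toNat) ((i, j) :: ctx) (v.add j) rm cm,
      pvKrun_eq matrix nn g0 i ctx v rm cm, hchild]
  by_cases hb : r0.1 = true
  · -- child succeeds: both sides return the unwound augmenting path
    have hR : pvKuhn matrix nn (nn + 1) i 0 v rm cm
        = (true, r0.2.1, r0.2.2.1.set i (Int.ofNat j), r0.2.2.2.set j (Int.ofNat i)) := by
      rw [hskip, hmatched]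
      simp only [hb, if_true]
    rw [hR]
    simp only [hb, if_true]
    rfl
  · -- child fails: the right-hand run resumes at column j+1; the left pops to row i
    simp only [Bool.not_eq_true] at hb
    have hfail := pvKuhn_fail matrix nn nn (cm.getD j (-1)).toNat 0 (v.add j) rm cm hb
    rw [← hr0] at hfail
    have hsub1 : ∀ x, x ∈ v.add j → x ∈ r0.2.1 := by
      rw [hr0]; exact pvKuhn_vmono matrix nn nn (cm.getD j (-1)).toNat 0 (v.add j) rm cm
    have humono : pvUnvis nn r0.2.1 ≤ pvUnvis nn (v.add j) := pvUnvis_mono nn _ _ hsub1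
    have hresume : pvKuhn matrix nn (nn + 1) i 0 r0.2.1 rm cm
        = pvKuhn matrix nn (nn + 1) i (j + 1) r0.2.1 rm cm := by
      apply pvKuhn_skip_many matrix nn (nn + 1) i r0.2.1 rm cm (j + 1) 0 (j + 1)
        (by omega) (by omega)
      intro jj h1 h2 hqq
      have hjjmem : jj ∈ r0.2.1 := by
        rcases Nat.lt_or_ge jj j with hlt | hge
        · rcases Classical.em (jj ∈ v) with hmem | hmem
          · exact hsub1 jj ((PySem.Set.mem_add v j jj).2 (Or.inl hmem))
          · exact absurd ⟨hqq.1, (pv_contains_false v jj).2 hmem⟩ (hfirst jj hlt)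
        · have he : jj = j := by omega
          exact hsub1 jj ((PySem.Set.mem_add v j jj).2 (Or.inr he))
      exact (pv_contains_false r0.2.1 jj).1 hqq.2 hjjmem
    have hR : pvKuhn matrix nn (nn + 1) i 0 v rm cm
        = pvKuhn matrix nn (nn + 1) i (j + 1) r0.2.1 rm cm := by
      rw [hskip, hmatched]
      simp only [hb, Bool.false_eq_true, if_false]
      rw [hfail.1, hfail.2]
    simp only [hb, Bool.false_eq_true, if_false]
    -- the left side pops (i, j): unfold one more level of pvKrun, fuel g0 = g1 + 1
    obtain ⟨g1, rfl⟩ : ∃ g1, g0 = g1 + 1 := ⟨g0 - 1, by omega⟩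
    rw [hfail.1, hfail.2]
    rw [pvKrun_eq matrix nn g1 i ctx r0.2.1 rm cm]
    rw [hresume, hR]
    by_cases hb1 : (pvKuhn matrix nn (nn + 1) i (j + 1) r0.2.1 rm cm).1 = true
    · simp only [hb1, if_true]
    · simp only [Bool.not_eq_true] at hb1
      simp only [hb1, Bool.false_eq_true, if_false]
      cases ctx with
      | nil => rfl
      | cons hd tl =>
        set K1 := pvKuhn matrix nn (nn + 1) i (j + 1) r0.2.1 rm cm with hK1
        have hsub2 : ∀ x, x ∈ r0.2.1 → x ∈ K1.2.1 := by
          rw [hK1]; exact pvKuhn_vmono matrix nn (nn + 1) i (j + 1) r0.2.1 rm cm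
        have humono2 : pvUnvis nn K1.2.1 ≤ pvUnvis nn r0.2.1 := pvUnvis_mono nn _ _ hsub2
        obtain ⟨rr, cc⟩ := hd
        apply pvKrun_fuel matrix nn tl g1 (g1 + 1) rr K1.2.1 K1.2.2.1 K1.2.2.2
        · simp only [List.length_cons] at hg; omega
        · simp only [List.length_cons] at hg; omega

-- ---- the invariant tying A's explicit stack, parent map and visited set together ----

-- stack rows top-down are i, r1, …, rk; (rt, ct): ancestor rt chose column ct,
-- whose matched row is the element above it; the bottom row is unmatched
def pvChain (matrix : List (List Int)) (nn : Nat) (v : PySem.Set Nat)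
    (p : PySem.Dict Nat Nat) (rm cm : List Int) : Nat → List (Nat × Nat) → Prop
  | i, [] => i < nn ∧ rm.getD i (-1) = -1
  | i, (r, c) :: ctx => i < nn ∧ r < nn ∧ c < nn ∧ c ∈ v ∧ p.get? c = some r ∧
      cm.getD c (-1) = Int.ofNat i ∧ c ∉ ctx.map Prod.snd ∧
      pvChain matrix nn v p rm cm r ctx

theorem pvChain_cols_mem (matrix : List (List Int)) (nn : Nat) (v : PySem.Set Nat)
    (p : PySem.Dict Nat Nat) (rm cm : List Int) :
    ∀ (ctx : List (Nat × Nat)) (i : Nat), pvChain matrix nn v p rm cm i ctx →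
    ∀ x ∈ ctx.map Prod.snd, x ∈ v := by
  intro ctx
  induction ctx with
  | nil => intro i _ x hx; simp at hx
  | cons hd tl ih =>
    obtain ⟨r, c⟩ := hd
    intro i hch x hx
    rcases List.mem_cons.1 hx with rfl | hx
    · exact hch.2.2.2.1
    · exact ih r hch.2.2.2.2.2.2.2 x hx

theorem pvChain_cols_nodup (matrix : List (List Int)) (nn : Nat) (v : PySem.Set Nat)
    (p : PySem.Dict Nat Nat) (rm cm : List Int) :
    ∀ (ctx : List (Nat × Nat)) (i : Nat), pvChain matrix nn v p rm cm i ctx →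
    (ctx.map Prod.snd).Nodup := by
  intro ctx
  induction ctx with
  | nil => intro i _; simp
  | cons hd tl ih =>
    obtain ⟨r, c⟩ := hd
    intro i hch
    exact List.nodup_cons.2 ⟨hch.2.2.2.2.2.2.1, ih r hch.2.2.2.2.2.2.2⟩

theorem pvChain_cols_lt (matrix : List (List Int)) (nn : Nat) (v : PySem.Set Nat)
    (p : PySem.Dict Nat Nat) (rm cm : List Int) :
    ∀ (ctx : List (Nat × Nat)) (i : Nat), pvChain matrix nn v p rm cm i ctx →
    ∀ x ∈ ctx.map Prod.snd, x < nn := by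
  intro ctx
  induction ctx with
  | nil => intro i _ x hx; simp at hx
  | cons hd tl ih =>
    obtain ⟨r, c⟩ := hd
    intro i hch x hx
    rcases List.mem_cons.1 hx with rfl | hx
    · exact hch.2.2.1
    · exact ih r hch.2.2.2.2.2.2.2 x hx

-- a chain whose columns are all visited, plus one fresh column, bounds the stack depth
theorem pvChain_len_lt (matrix : List (List Int)) (nn : Nat) (v : PySem.Set Nat)
    (p : PySem.Dict Nat Nat) (rm cm : List Int) (ctx : List (Nat × Nat)) (i j : Nat)
    (hch : pvChain matrix nn v p rm cm i ctx) (hj : j < nn) (hjv : j ∉ v) :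
    ctx.length + 1 ≤ nn := by
  have hnd : (j :: ctx.map Prod.snd).Nodup := by
    refine List.nodup_cons.2 ⟨?_, pvChain_cols_nodup matrix nn v p rm cm ctx i hch⟩
    intro hmem
    exact hjv (pvChain_cols_mem matrix nn v p rm cm ctx i hch j hmem)
  have hsubs : (j :: ctx.map Prod.snd) ⊆ List.range nn := by
    intro x hx
    rcases List.mem_cons.1 hx with rfl | hx
    · simpa using hj
    · simpa using pvChain_cols_lt matrix nn v p rm cm ctx i hch x hx
  have := List.Subperm.length_le (List.subperm_of_subset hnd hsubs)
  simpa using this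

theorem pvChain_mono (matrix : List (List Int)) (nn : Nat) (v v' : PySem.Set Nat)
    (p : PySem.Dict Nat Nat) (rm cm : List Int) (jnew i0 : Nat)
    (hsub : ∀ x, x ∈ v → x ∈ v') (hnew : jnew ∉ v) :
    ∀ (ctx : List (Nat × Nat)) (i : Nat), pvChain matrix nn v p rm cm i ctx →
    pvChain matrix nn v' (p.insert jnew i0) rm cm i ctx := by
  intro ctx
  induction ctx with
  | nil => intro i hch; exact hch
  | cons hd tl ih =>
    obtain ⟨r, c⟩ := hd
    intro i hch
    obtain ⟨h1, h2, h3, h4, h5, h6, h7, h8⟩ := hch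
    refine ⟨h1, h2, h3, hsub c h4, ?_, h6, h7, ih r h8⟩
    rw [PySem.Dict.get?_insert_of_ne p i0 (fun hh => hnew (by rw [← hh]; exact h4))]
    exact h5

-- ---- what the trace-back flip loop needs about the current state ----

def pvFlipOK (nn : Nat) (p : PySem.Dict Nat Nat) (rm : List Int) :
    Nat → List (Nat × Nat) → Prop
  | i, [] => i < nn ∧ rm.getD i (-1) = -1
  | i, (r, c) :: ctx => i < nn ∧ r < nn ∧ c < nn ∧ rm.getD i (-1) = Int.ofNat c ∧
      p.get? c = some r ∧ i ∉ r :: ctx.map Prod.fst ∧ pvFlipOK nn p rm r ctx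

theorem pvFlipOK_congr (nn : Nat) (p : PySem.Dict Nat Nat) :
    ∀ (ctx : List (Nat × Nat)) (i : Nat) (rm rm' : List Int),
    pvFlipOK nn p rm i ctx →
    (∀ ρ ∈ i :: ctx.map Prod.fst, rm'.getD ρ (-1) = rm.getD ρ (-1)) →
    pvFlipOK nn p rm' i ctx := by
  intro ctx
  induction ctx with
  | nil =>
    intro i rm rm' hok hr
    exact ⟨hok.1, by rw [hr i (by simp)]; exact hok.2⟩
  | cons hd tl ih =>
    obtain ⟨r, c⟩ := hd
    intro i rm rm' hok hr
    obtain ⟨h1, h2, h3, h4, h5, h6, h7⟩ := hok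
    refine ⟨h1, h2, h3, by rw [hr i (by simp)]; exact h4, h5, h6, ?_⟩
    exact ih r rm rm' h7 (fun ρ hρ => hr ρ (by simp at hρ ⊢; tauto))

-- the flip loop, traced along the chain, performs exactly the unwind assignments
theorem pvFlipA_go (nn : Nat) (p : PySem.Dict Nat Nat) :
    ∀ (ctx : List (Nat × Nat)) (i jn : Nat) (rm cm : List Int) (fl : Nat),
    pvFlipOK nn p rm i ctx → jn < nn → p.get? jn = some i → ctx.length + 2 ≤ fl →
    pvFlipA p fl (Int.ofNat jn) rm cm
      = pvUnwind ctx (rm.set i (Int.ofNat jn)) (cm.set jn (Int.ofNat i)) := by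
  intro ctx
  induction ctx with
  | nil =>
    intro i jn rm cm fl hok hjn hp hfl
    obtain ⟨fl1, rfl⟩ : ∃ fl1, fl = fl1 + 2 := ⟨fl - 2, by omega⟩
    show (if (Int.ofNat jn) = -1 then (rm, cm) else _) = _
    rw [if_neg (by simp)]
    simp only [pv_toNat_ofNat, hp, Option.getD_some, hok.2]
    show (if (-1 : Int) = -1 then _ else _) = _
    rw [if_pos rfl]
    rfl
  | cons hd tl ih =>
    obtain ⟨r, c⟩ := hd
    intro i jn rm cm fl hok hjn hp hfl
    obtain ⟨h1, h2, h3, h4, h5, h6, h7⟩ := hok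
    obtain ⟨fl1, rfl⟩ : ∃ fl1, fl = fl1 + 1 := ⟨fl - 1, by omega⟩
    show (if (Int.ofNat jn) = -1 then (rm, cm) else _) = _
    rw [if_neg (by simp)]
    simp only [pv_toNat_ofNat, hp, Option.getD_some, h4]
    have hok' : pvFlipOK nn p (rm.set i (Int.ofNat jn)) r tl := by
      refine pvFlipOK_congr nn p tl r rm (rm.set i (Int.ofNat jn)) h7 ?_
      intro ρ hρ
      exact pv_getD_set_ne rm i ρ (Int.ofNat jn) (-1) (fun hh => h6 (hh ▸ hρ))
    exact ih r c (rm.set i (Int.ofNat jn)) (cm.set jn (Int.ofNat i)) fl1 hok' h3 h5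
      (by simp at hfl ⊢; omega)

-- a chain, together with the matching invariant, yields the flip precondition
theorem pvChain_rm_spec (matrix : List (List Int)) (nn : Nat) (v : PySem.Set Nat)
    (p : PySem.Dict Nat Nat) (rm cm : List Int) (hM : pvM nn rm cm) :
    ∀ (ctx : List (Nat × Nat)) (i : Nat), pvChain matrix nn v p rm cm i ctx →
    ∀ ρ ∈ i :: ctx.map Prod.fst,
      rm.getD ρ (-1) = -1 ∨ ∃ cc ∈ ctx.map Prod.snd, rm.getD ρ (-1) = Int.ofNat cc := by
  obtain ⟨hlr, hlc, hR, hC⟩ := hM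
  intro ctx
  induction ctx with
  | nil =>
    intro i hch ρ hρ
    obtain rfl : ρ = i := by simpa using hρ
    exact Or.inl hch.2
  | cons hd tl ih =>
    obtain ⟨r, c⟩ := hd
    intro i hch ρ hρ
    obtain ⟨h1, h2, h3, h4, h5, h6, h7, h8⟩ := hch
    rcases List.mem_cons.1 hρ with rfl | hρ
    · -- rm[i] = c via the matching invariant
      rcases hC c h3 with hc1 | ⟨a, ha, hc1, hc2⟩
      · rw [h6] at hc1; simp at hc1
      · rw [h6] at hc1
        have : a = ρ := Int.ofNat.inj hc1.symm
        subst this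
        exact Or.inr ⟨c, by simp, hc2⟩
    · rcases ih r h8 ρ hρ with h' | ⟨cc, hcc, h'⟩
      · exact Or.inl h'
      · exact Or.inr ⟨cc, by simp [hcc], h'⟩

theorem pvChain_flipok (matrix : List (List Int)) (nn : Nat) (v : PySem.Set Nat)
    (p : PySem.Dict Nat Nat) (rm cm : List Int) (hM : pvM nn rm cm) :
    ∀ (ctx : List (Nat × Nat)) (i : Nat), pvChain matrix nn v p rm cm i ctx →
    pvFlipOK nn p rm i ctx := by
  intro ctx
  induction ctx with
  | nil => intro i hch; exact hch
  | cons hd tl ih =>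
    obtain ⟨r, c⟩ := hd
    intro i hch
    obtain ⟨h1, h2, h3, h4, h5, h6, h7, h8⟩ := hch
    have hrmi : rm.getD i (-1) = Int.ofNat c := by
      rcases hM.2.2.2 c h3 with hc1 | ⟨a, ha, hc1, hc2⟩
      · rw [h6] at hc1; simp at hc1
      · rw [h6] at hc1
        have : a = i := Int.ofNat.inj hc1.symm
        subst this
        exact hc2
    refine ⟨h1, h2, h3, hrmi, h5, ?_, ih r h8⟩
    intro hmem
    rcases pvChain_rm_spec matrix nn v p rm cm hM tl r h8 i hmem with h' | ⟨cc, hcc, h'⟩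
    · rw [hrmi] at h'; simp at h'
    · rw [hrmi] at h'
      have : c = cc := Int.ofNat.inj h'
      exact h7 (this ▸ hcc)

-- ---- the simulation: A's stack loop runs the recursive Kuhn search ----

theorem pvLoopA_nil (matrix : List (List Int)) (nn f : Nat) (v : PySem.Set Nat)
    (p : PySem.Dict Nat Nat) (rm cm : List Int) :
    pvLoopA matrix nn f [] v p rm cm = (false, rm, cm) := by
  cases f <;> rfl

theorem pvLoopA_cons (matrix : List (List Int)) (nn f i : Nat) (rest : List Nat)
    (v : PySem.Set Nat) (p : PySem.Dict Nat Nat) (rm cm : List Int) :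
    pvLoopA matrix nn (f + 1) (i :: rest) v p rm cm =
      match pvScanA matrix nn i v 0 with
      | none => pvLoopA matrix nn f rest v p rm cm
      | some j =>
        if cm.getD j (-1) = -1 then
          (true, (pvFlipA (p.insert j i) (nn + 1) (Int.ofNat j) rm cm).1,
            (pvFlipA (p.insert j i) (nn + 1) (Int.ofNat j) rm cm).2)
        else
          pvLoopA matrix nn f ((cm.getD j (-1)).toNat :: i :: rest) (v.add j)
            (p.insert j i) rm cm := rfl

theorem pvChain_top_lt (matrix : List (List Int)) (nn : Nat) (v : PySem.Set Nat)
    (p : PySem.Dict Nat Nat) (rm cm : List Int) (i : Nat) (ctx : List (Nat × Nat))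
    (hch : pvChain matrix nn v p rm cm i ctx) : i < nn := by
  cases ctx with
  | nil => exact hch.1
  | cons hd tl => obtain ⟨r, c⟩ := hd; exact hch.1

theorem pvMain (matrix : List (List Int)) (nn : Nat) :
    ∀ (f i : Nat) (ctx : List (Nat × Nat)) (v : PySem.Set Nat)
      (p : PySem.Dict Nat Nat) (rm cm : List Int) (g : Nat),
    pvM nn rm cm → pvChain matrix nn v p rm cm i ctx →
    2 * pvUnvis nn v + ctx.length + 2 ≤ f →
    pvUnvis nn v + ctx.length + 2 ≤ g →
    pvLoopA matrix nn f (i :: ctx.map Prod.fst) v p rm cm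
      = pvKrun matrix nn g i ctx v rm cm := by
  intro f
  induction f with
  | zero => intro i ctx v p rm cm g _ _ hf _; omega
  | succ f ih =>
    intro i ctx v p rm cm g hM hch hf hg
    obtain ⟨g0, rfl⟩ : ∃ g0, g = g0 + 1 := ⟨g - 1, by omega⟩
    rw [pvLoopA_cons]
    cases hscan : pvScanA matrix nn i v 0 with
    | none =>
      have hall : ∀ jj, jj < nn → ¬ (pvCell matrix i jj = 0 ∧ v.contains jj = false) :=
        fun jj hjj => pvScanA_none matrix nn i v 0 hscan jj (Nat.zero_le _) hjj
      have hkuhn : pvKuhn matrix nn (nn + 1) i 0 v rm cm = (false, v, rm, cm) :=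
        pvKuhn_allfail matrix nn (nn + 1) i v rm cm hall nn 0 (by omega)
      rw [pvKrun_eq matrix nn g0 i ctx v rm cm, hkuhn]
      cases ctx with
      | nil => simp [pvLoopA_nil]
      | cons hd tl =>
        obtain ⟨r', c'⟩ := hd
        simp only [List.map_cons]
        have htl := hch.2.2.2.2.2.2.2
        rw [ih r' tl v p rm cm g0 hM htl
          (by simp only [List.length_cons] at hf ⊢; omega)
          (by simp only [List.length_cons] at hg ⊢; omega)]
        simp
    | some j =>
      obtain ⟨h0j, hjnn, hcellj, hcontj, hfirst'⟩ := pvScanA_some matrix nn i v 0 j hscan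
      have hfirst : ∀ jj, jj < j → ¬ (pvCell matrix i jj = 0 ∧ v.contains jj = false) :=
        fun jj hj2 => hfirst' jj (Nat.zero_le _) hj2
      have hjv : j ∉ v := (pv_contains_false v j).1 hcontj
      have hitop : i < nn := pvChain_top_lt matrix nn v p rm cm i ctx hch
      have hskip : pvKuhn matrix nn (nn + 1) i 0 v rm cm
          = pvKuhn matrix nn (nn + 1) i j v rm cm :=
        pvKuhn_skip_many matrix nn (nn + 1) i v rm cm j 0 j (by omega) (by omega)
          (fun jj h1 h2 => hfirst jj h2)
      have hlen := pvChain_len_lt matrix nn v p rm cm ctx i j hch hjnn hjv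
      by_cases hcm : cm.getD j (-1) = -1
      · -- free column: A flips along the parent chain, Kuhn succeeds at once
        simp only [hcm, if_true]
        have hkuhn : pvKuhn matrix nn (nn + 1) i 0 v rm cm
            = (true, v.add j, rm.set i (Int.ofNat j), cm.set j (Int.ofNat i)) := by
          rw [hskip]
          exact pvKuhn_at_free matrix nn (nn + 1) i j v rm cm hjnn ⟨hcellj, hcontj⟩ hcm
        rw [pvKrun_eq matrix nn g0 i ctx v rm cm, hkuhn]
        have hchain' := pvChain_mono matrix nn v v p rm cm j i (fun x hx => hx) hjv ctx i hch
        have hflipok := pvChain_flipok matrix nn v (p.insert j i) rm cm hM ctx i hchain'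
        have hflip := pvFlipA_go nn (p.insert j i) ctx i j rm cm (nn + 1) hflipok hjnn
          (PySem.Dict.get?_insert_self p j i) (by omega)
        rw [hflip]
        simp
      · -- matched column: A pushes the partner row, Kuhn recurses into it
        simp only [if_neg hcm]
        obtain ⟨cn, hcn, hcmj, hrmcn⟩ :
            ∃ cn, cn < nn ∧ cm.getD j (-1) = Int.ofNat cn ∧ rm.getD cn (-1) = Int.ofNat j := by
          rcases hM.2.2.2 j hjnn with h1 | ⟨a, ha, h1, h2⟩
          · exact absurd h1 hcm
          · exact ⟨a, ha, h1, h2⟩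
        have ecn : (cm.getD j (-1)).toNat = cn := by rw [hcmj]; exact pv_toNat_ofNat cn
        have hchain' : pvChain matrix nn (v.add j) (p.insert j i) rm cm cn ((i, j) :: ctx) := by
          refine ⟨hcn, hitop, hjnn, (PySem.Set.mem_add v j j).2 (Or.inr rfl),
            PySem.Dict.get?_insert_self p j i, hcmj, ?_, ?_⟩
          · intro hmem
            exact hjv (pvChain_cols_mem matrix nn v p rm cm ctx i hch j hmem)
          · exact pvChain_mono matrix nn v (v.add j) p rm cm j i
              (fun x hx => (PySem.Set.mem_add v j x).2 (Or.inl hx)) hjv ctx i hch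
        have hu : pvUnvis nn (v.add j) + 1 = pvUnvis nn v := pvUnvis_add nn v j hjnn hjv
        have hih := ih cn ((i, j) :: ctx) (v.add j) (p.insert j i) rm cm (g0 + 1) hM hchain'
          (by simp only [List.length_cons] at hf ⊢; omega)
          (by simp only [List.length_cons] at hg ⊢; omega)
        have estack : ((i, j) :: ctx).map Prod.fst = i :: ctx.map Prod.fst := rfl
        rw [ecn, ← estack, hih]
        have hstep := pvKrun_step matrix nn (g0 + 1) i j ctx v rm cm hjnn hcellj hjv hfirst hcm hg
        rw [ecn] at hstep
        exact hstep

-- ---- assembling the per-row equivalence and the outer loop ----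

theorem pvUnvis_empty (nn : Nat) : pvUnvis nn PySem.Set.empty = nn := by
  simp [pvUnvis, PySem.Set.empty]

theorem pvAug_eq (matrix : List (List Int)) (nn start : Nat) (rm cm : List Int)
    (hM : pvM nn rm cm) (hstart : start < nn) (hunm : rm.getD start (-1) = -1) :
    pvAugA matrix nn start rm cm
      = ((pvKuhn matrix nn (nn + 1) start 0 PySem.Set.empty rm cm).1,
         (pvKuhn matrix nn (nn + 1) start 0 PySem.Set.empty rm cm).2.2.1,
         (pvKuhn matrix nn (nn + 1) start 0 PySem.Set.empty rm cm).2.2.2) := by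
  have hmain := pvMain matrix nn (2 * nn + 2) start [] PySem.Set.empty PySem.Dict.empty
    rm cm (nn + 2) hM ⟨hstart, hunm⟩ (by rw [pvUnvis_empty]; simp only [List.length_nil]; omega)
    (by rw [pvUnvis_empty]; simp only [List.length_nil]; omega)
  have e1 : pvAugA matrix nn start rm cm
      = pvKrun matrix nn (nn + 2) start [] PySem.Set.empty rm cm := hmain
  rw [e1, pvKrun_eq matrix nn (nn + 1) start [] PySem.Set.empty rm cm]
  by_cases hb : (pvKuhn matrix nn (nn + 1) start 0 PySem.Set.empty rm cm).1 = true
  · simp only [hb, if_true]; rfl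
  · simp only [Bool.not_eq_true] at hb
    simp only [hb, Bool.false_eq_true, if_false]

theorem pvStep_M (matrix : List (List Int)) (nn i : Nat) (rm cm : List Int)
    (hM : pvM nn rm cm) (hi : i < nn) (hunm : rm.getD i (-1) = -1) :
    pvM nn (pvKuhn matrix nn (nn + 1) i 0 PySem.Set.empty rm cm).2.2.1
      (pvKuhn matrix nn (nn + 1) i 0 PySem.Set.empty rm cm).2.2.2 := by
  by_cases hb : (pvKuhn matrix nn (nn + 1) i 0 PySem.Set.empty rm cm).1 = true
  · obtain ⟨K1, K2, _, _, _, K6, K7⟩ :=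
      pvKuhn_succ matrix nn (nn + 1) i 0 PySem.Set.empty rm cm hM hi (Or.inl hunm) hb
    refine ⟨K1, K2, K6, ?_⟩
    intro jj hjj
    rcases K7 jj hjj with h1 | h1 | h1
    · exact Or.inl h1
    · rw [hunm] at h1; simp at h1
    · exact Or.inr h1
  · simp only [Bool.not_eq_true] at hb
    have hfail := pvKuhn_fail matrix nn (nn + 1) i 0 PySem.Set.empty rm cm hb
    rw [hfail.1, hfail.2]
    exact hM

theorem pvMatch_fold (matrix : List (List Int)) (nn : Nat) :
    ∀ (l : List Nat) (s : List Int × List Int), pvM nn s.1 s.2 → (∀ x ∈ l, x < nn) →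
    (l.foldl (fun s i =>
        if s.1.getD i (-1) = -1 then
          let r := pvAugA matrix nn i s.1 s.2
          (r.2.1, r.2.2)
        else s) s
      = l.foldl (fun s i =>
        if s.1.getD i (-1) = -1 then
          let r := pvKuhn matrix nn (nn + 1) i 0 PySem.Set.empty s.1 s.2
          (r.2.2.1, r.2.2.2)
        else s) s) ∧
    pvM nn (l.foldl (fun s i =>
        if s.1.getD i (-1) = -1 then
          let r := pvKuhn matrix nn (nn + 1) i 0 PySem.Set.empty s.1 s.2
          (r.2.2.1, r.2.2.2)
        else s) s).1
      (l.foldl (fun s i =>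
        if s.1.getD i (-1) = -1 then
          let r := pvKuhn matrix nn (nn + 1) i 0 PySem.Set.empty s.1 s.2
          (r.2.2.1, r.2.2.2)
        else s) s).2 := by
  intro l
  induction l with
  | nil => intro s hM _; exact ⟨rfl, hM⟩
  | cons i l ih =>
    intro s hM hlt
    have hi : i < nn := hlt i (List.mem_cons_self)
    by_cases hunm : s.1.getD i (-1) = -1
    · simp only [List.foldl_cons, hunm, if_true]
      have haug := pvAug_eq matrix nn i s.1 s.2 hM hi hunm
      have estep : ((pvAugA matrix nn i s.1 s.2).2.1, (pvAugA matrix nn i s.1 s.2).2.2)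
          = ((pvKuhn matrix nn (nn + 1) i 0 PySem.Set.empty s.1 s.2).2.2.1,
             (pvKuhn matrix nn (nn + 1) i 0 PySem.Set.empty s.1 s.2).2.2.2) := by
        rw [haug]
      rw [estep]
      exact ih _ (pvStep_M matrix nn i s.1 s.2 hM hi hunm) (fun x hx => hlt x (List.mem_cons_of_mem i hx))
    · simp only [List.foldl_cons, hunm]
      exact ih s hM (fun x hx => hlt x (List.mem_cons_of_mem i hx))

theorem pvM_init (nn : Nat) : pvM nn (List.replicate nn (-1)) (List.replicate nn (-1)) := by
  have hget : ∀ a, (List.replicate nn (-1 : Int)).getD a (-1) = -1 := by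
    intro a
    by_cases ha : a < nn
    · simp [List.getD, ha]
    · simp [List.getD, ha]
  exact ⟨List.length_replicate, List.length_replicate,
    fun a _ => Or.inl (hget a), fun jj _ => Or.inl (hget jj)⟩

theorem pvMatch_eq (matrix : List (List Int)) (nn : Nat) :
    pvMatchA matrix nn = pvMatchB matrix nn := by
  unfold pvMatchA pvMatchB
  exact (pvMatch_fold matrix nn (List.range nn)
    (List.replicate nn (-1), List.replicate nn (-1)) (pvM_init nn)
    (fun x hx => List.mem_range.1 hx)).1


-- ===== VERDICT (by name: the statement is the Claim_ definition above) =====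
theorem min_line_cover_py_spec : Claim_equal_min_line_cover_py := by
  intro matrix n _ _
  unfold Spec_min_line_cover_py min_line_cover_py min_line_cover_py_alt
  simp only [pvMatch_eq]
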